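-- pv_equiv track=rewrite | github.com/INK-USC/expl-refinement | matcher/modules.py | get_st_ed0
-- ===== SOURCE A (Python) =====
-- def get_st_ed0(score):
--     st, ed = -1, -1
--     flag1 = True
--     flag2 = True
--     for idx, item in enumerate(score):
--         if flag1 and item == 1:
--             st = idx
--             flag1 = False
--         if flag2 and not flag1 and item == 0:
--             ed = idx - 1
--             flag2 = False
--             break
--     if flag2:
--         ed = len(score)
--     return st, ed
-- ===== SOURCE B (Python) =====
-- def get_st_ed0(score):
--     # Run-length encode: one (value, start_index) pair per maximal run of equal values.
--     runs = []
--     for i, v in enumerate(score):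
--         if not runs or runs[-1][0] != v:
--             runs.append((v, i))
--     # Decide the answer from the run list.
--     st, ed = -1, len(score)
--     seen_one = False
--     for v, start in runs:
--         if not seen_one:
--             if v == 1:
--                 st = start
--                 seen_one = True
--         elif v == 0:
--             ed = start - 1
--             break
--     if not seen_one:
--         return -1, len(score)
--     return st, ed
-- ===== Notes on version B (the rewrite author's own statement) =====
-- stated objective: alternative
-- what changed: Instead of A's flag-driven single scan, B first run-length-encodes the list into (value, start_index) runs and then reads the answer off the run list: the start of the first 1-run and the start of the first later 0-run.
import Mathlib
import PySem

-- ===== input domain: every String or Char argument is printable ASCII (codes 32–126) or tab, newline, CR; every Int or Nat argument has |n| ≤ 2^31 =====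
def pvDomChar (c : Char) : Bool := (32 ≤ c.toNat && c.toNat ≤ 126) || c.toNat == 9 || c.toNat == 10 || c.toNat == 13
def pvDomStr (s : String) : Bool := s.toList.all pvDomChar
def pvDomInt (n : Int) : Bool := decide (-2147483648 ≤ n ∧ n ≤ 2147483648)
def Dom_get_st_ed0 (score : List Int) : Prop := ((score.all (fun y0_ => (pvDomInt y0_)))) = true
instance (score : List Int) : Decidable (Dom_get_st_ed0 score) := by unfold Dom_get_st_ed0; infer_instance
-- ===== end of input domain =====

-- B replaces A's flag-driven single scan by a run-length encoding of the list followed by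
-- a decision over the run list; an alternative of the same O(n) cost.

-- ===== PORT A =====
-- A's for-loop over enumerate(score) with state (st, ed, flag1, flag2); break returns early.
-- Result carries flag2 so the trailing 'if flag2: ed = len(score)' can be applied.
def pvGoA : List Int → Nat → Int → Int → Bool → Bool → Int × Int × Bool
  | [], _, st, ed, _, flag2 => (st, ed, flag2)
  | item :: rest, idx, st, ed, flag1, flag2 =>
    let p := if flag1 && (item == 1) then ((idx : Int), false) else (st, flag1)
    if flag2 && (!p.2) && (item == 0) then (p.1, (idx : Int) - 1, false)
    else pvGoA rest (idx + 1) p.1 ed p.2 flag2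

def get_st_ed0 (score : List Int) : Int × Int :=
  let r := pvGoA score 0 (-1) (-1) true true
  (r.1, if r.2.2 then (score.length : Int) else r.2.1)

-- ===== PORT B =====
-- Run-length encoding pass: one (value, start_index) pair per maximal run of equal values.
-- 'prev' is the value of the previous element (none at the start), standing for runs[-1][0].
def pvRuns : List Int → Nat → Option Int → List (Int × Nat)
  | [], _, _ => []
  | v :: rest, i, prev =>
    if prev == some v then pvRuns rest (i + 1) (some v)
    else (v, i) :: pvRuns rest (i + 1) (some v)

-- The decision loop over the run list with state (st, ed, seen_one); break returns early.
def pvScan : List (Int × Nat) → Int → Int → Bool → Int × Int × Bool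
  | [], st, ed, seen => (st, ed, seen)
  | (v, s) :: rest, st, ed, seen =>
    if !seen then
      if v == 1 then pvScan rest (s : Int) ed true
      else pvScan rest st ed seen
    else if v == 0 then (st, (s : Int) - 1, seen)
    else pvScan rest st ed seen

def get_st_ed0_alt (score : List Int) : Int × Int :=
  let runs := pvRuns score 0 none
  let r := pvScan runs (-1) (score.length : Int) false
  if r.2.2 then (r.1, r.2.1) else (-1, (score.length : Int))

-- ===== PRECONDITION & SPEC =====
def Spec_get_st_ed0 (score : List Int) (out : Int × Int) : Prop := out = get_st_ed0_alt score
instance (score : List Int) (out : Int × Int) : Decidable (Spec_get_st_ed0 score out) := by unfold Spec_get_st_ed0; infer_instance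

-- ===== CLAIM (what is proved, stated in full; the proofs are below) =====
def Claim_equal_get_st_ed0 : Prop := ∀ (score : List Int), Dom_get_st_ed0 score → Spec_get_st_ed0 score (get_st_ed0 score)

-- ===== LEMMAS AND PROOFS =====

-- Proof-only search helpers: first index (from i) whose element is 1 resp. 0.
def pvFindOne : List Int → Nat → Option Nat
  | [], _ => none
  | x :: rest, i => if x == 1 then some i else pvFindOne rest (i + 1)

def pvFindZero : List Int → Nat → Option Nat
  | [], _ => none
  | x :: rest, i => if x == 0 then some i else pvFindZero rest (i + 1)

-- After the 1 was found (flag1 = false, flag2 = true), A's loop is exactly a search for the first 0.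
theorem pvGoA_zero_phase (xs : List Int) : ∀ (i : Nat) (st : Int),
    pvGoA xs i st (-1) false true =
      match pvFindZero xs i with
      | none => (st, -1, true)
      | some z => (st, (z : Int) - 1, false) := by
  induction xs with
  | nil => intro i st; simp [pvGoA, pvFindZero]
  | cons x rest ih =>
    intro i st
    by_cases hx : x = 0
    · simp [pvGoA, pvFindZero, hx]
    · simp [pvGoA, pvFindZero, hx, ih]

theorem pvFindOne_le (xs : List Int) : ∀ (i s : Nat), pvFindOne xs i = some s → i ≤ s := by
  induction xs with
  | nil => intro i s h; simp [pvFindOne] at h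
  | cons x rest ih =>
    intro i s h
    by_cases hx : x = 1
    · simp [pvFindOne, hx] at h; omega
    · simp [pvFindOne, hx] at h
      have := ih (i + 1) s h; omega

-- The whole of A's loop from the initial state, described by pvFindOne/pvFindZero.
theorem pvGoA_run (xs : List Int) : ∀ (i : Nat),
    pvGoA xs i (-1) (-1) true true =
      match pvFindOne xs i with
      | none => (-1, -1, true)
      | some s =>
        match pvFindZero (xs.drop (s + 1 - i)) (s + 1) with
        | none => ((s : Int), -1, true)
        | some z => ((s : Int), (z : Int) - 1, false) := by
  induction xs with
  | nil => intro i; simp [pvGoA, pvFindOne]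
  | cons x rest ih =>
    intro i
    by_cases hx : x = 1
    · have : pvGoA (x :: rest) i (-1) (-1) true true
          = pvGoA rest (i + 1) (i : Int) (-1) false true := by
        simp [pvGoA, hx]
      rw [this, pvGoA_zero_phase]
      simp [pvFindOne, hx]
    · have : pvGoA (x :: rest) i (-1) (-1) true true
          = pvGoA rest (i + 1) (-1) (-1) true true := by
        simp [pvGoA, hx]
      rw [this, ih]
      simp only [pvFindOne]
      cases hfo : pvFindOne rest (i + 1) with
      | none => simp [if_neg hx]
      | some s =>
        have hle := pvFindOne_le rest (i + 1) s hfo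
        have hdr : (x :: rest).drop (s + 1 - i) = rest.drop (s + 1 - (i + 1)) := by
          have : s + 1 - i = (s + 1 - (i + 1)) + 1 := by omega
          rw [this]; simp
        simp [if_neg hx, hdr]

-- With seen_one = true and the previous element not 0, B's scan over the runs of xs
-- is exactly a search for the first 0 of xs.
theorem pvScan_zero_phase (xs : List Int) : ∀ (i : Nat) (p st ed : Int), p ≠ 0 →
    pvScan (pvRuns xs i (some p)) st ed true =
      match pvFindZero xs i with
      | none => (st, ed, true)
      | some z => (st, (z : Int) - 1, true) := by
  induction xs with
  | nil => intro i p st ed hp; simp [pvRuns, pvScan, pvFindZero]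
  | cons x rest ih =>
    intro i p st ed hp
    by_cases hx : x = 0
    · simp [pvRuns, pvScan, pvFindZero, hx, hp]
    · by_cases hpx : p = x
      · have h1 : pvRuns (x :: rest) i (some p) = pvRuns rest (i + 1) (some x) := by
          simp [pvRuns, hpx]
        rw [h1, ih (i + 1) x st ed hx]
        simp [pvFindZero, hx]
      · have h1 : pvRuns (x :: rest) i (some p) = (x, i) :: pvRuns rest (i + 1) (some x) := by
          simp [pvRuns, hpx]
        have h2 : pvScan ((x, i) :: pvRuns rest (i + 1) (some x)) st ed true
            = pvScan (pvRuns rest (i + 1) (some x)) st ed true := by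
          simp [pvScan, hx]
        rw [h1, h2, ih (i + 1) x st ed hx]
        simp [pvFindZero, hx]

-- B's scan from the initial state, for any previous value that is not 1,
-- described by pvFindOne/pvFindZero (same shape as pvGoA_run).
theorem pvScan_run (xs : List Int) : ∀ (i : Nat) (prev : Option Int) (ed : Int),
    prev ≠ some 1 →
    pvScan (pvRuns xs i prev) (-1) ed false =
      match pvFindOne xs i with
      | none => (-1, ed, false)
      | some s =>
        match pvFindZero (xs.drop (s + 1 - i)) (s + 1) with
        | none => ((s : Int), ed, true)
        | some z => ((s : Int), (z : Int) - 1, true) := by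
  induction xs with
  | nil => intro i prev ed hp; simp [pvRuns, pvScan, pvFindOne]
  | cons x rest ih =>
    intro i prev ed hp
    by_cases hx : x = 1
    · have hne : ¬ (prev == some x) := by
        subst hx; simpa using hp
      have h1 : pvRuns (x :: rest) i prev = (x, i) :: pvRuns rest (i + 1) (some x) := by
        simp [pvRuns]; intro h; exact absurd h (by simpa using hne)
      rw [h1]
      have h2 : pvScan ((x, i) :: pvRuns rest (i + 1) (some x)) (-1) ed false
          = pvScan (pvRuns rest (i + 1) (some x)) (i : Int) ed true := by
        simp [pvScan, hx]
      rw [h2, pvScan_zero_phase rest (i + 1) x (i : Int) ed (by omega)]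
      simp [pvFindOne, hx]
    · have hrec : pvScan (pvRuns (x :: rest) i prev) (-1) ed false
          = pvScan (pvRuns rest (i + 1) (some x)) (-1) ed false := by
        by_cases hpx : prev == some x
        · simp [pvRuns, hpx]
        · simp [pvRuns, hpx, pvScan, hx]
      rw [hrec, ih (i + 1) (some x) ed (by simpa using hx)]
      simp only [pvFindOne]
      cases hfo : pvFindOne rest (i + 1) with
      | none => simp [if_neg hx]
      | some s =>
        have hle := pvFindOne_le rest (i + 1) s hfo
        have hdr : (x :: rest).drop (s + 1 - i) = rest.drop (s + 1 - (i + 1)) := by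
          have : s + 1 - i = (s + 1 - (i + 1)) + 1 := by omega
          rw [this]; simp
        simp [if_neg hx, hdr]

-- ===== VERDICT (by name: the statement is the Claim_ definition above) =====
theorem get_st_ed0_spec : Claim_equal_get_st_ed0 := by
  intro score _
  unfold Spec_get_st_ed0
  show get_st_ed0 score = get_st_ed0_alt score
  simp only [get_st_ed0, get_st_ed0_alt]
  rw [pvGoA_run, pvScan_run score 0 none (score.length : Int) (by simp)]
  cases hfo : pvFindOne score 0 with
  | none => simp
  | some s =>
    cases hfz : pvFindZero (score.drop (s + 1)) (s + 1) <;>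
      simp only [Nat.sub_zero, hfz] <;> simp
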